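-- pv_equiv track=rewrite | github.com/vvrmahendra/DS-AlgoPrac | strings/minSwaps.py | solve
-- ===== SOURCE A (Python) =====
-- def solve(A):
--     n = len(A)
--     ones = sum([1 for i in A if int(i)])
--     sun_indexes = sum([i for i in range(n) if int(A[i])])
--     ans1 = sun_indexes-(ones)*(ones-1)//2
--     ones = sum([1 for i in A if not int(i)])
--     sun_indexes = sum([i for i in range(n) if not int(A[i])])
--     ans2 = sun_indexes-(ones)*(ones-1)//2
--     return min(ans1, ans2)
-- ===== SOURCE B (Python) =====
-- def solve(A):
--     zeros_seen = ones_seen = 0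
--     swaps_ones = swaps_zeros = 0
--     for x in A:
--         if int(x):
--             swaps_ones += zeros_seen
--             ones_seen += 1
--         else:
--             swaps_zeros += ones_seen
--             zeros_seen += 1
--     return min(swaps_ones, swaps_zeros)
-- ===== Notes on version B (the rewrite author's own statement) =====
-- stated objective: simpler
-- what changed: Replaced A's four separate comprehension passes plus the index-sum-minus-k(k-1)/2 closed form by one single pass that incrementally accumulates, for each element, the number of opposite elements seen so far (an online inversion count).
import Mathlib
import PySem

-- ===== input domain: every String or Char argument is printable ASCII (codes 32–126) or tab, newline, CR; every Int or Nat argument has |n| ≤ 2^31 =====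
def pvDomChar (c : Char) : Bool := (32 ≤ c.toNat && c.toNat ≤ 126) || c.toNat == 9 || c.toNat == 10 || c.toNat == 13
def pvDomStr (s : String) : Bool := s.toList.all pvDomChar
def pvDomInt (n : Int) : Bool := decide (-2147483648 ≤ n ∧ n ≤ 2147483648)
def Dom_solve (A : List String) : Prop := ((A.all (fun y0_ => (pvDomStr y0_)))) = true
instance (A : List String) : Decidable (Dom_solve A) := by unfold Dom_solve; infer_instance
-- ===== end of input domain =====

-- B replaces A's four comprehension passes and the index-sum − k(k−1)//2 closed form by one
-- single pass accumulating, per element, the count of opposite elements seen so far (objective: simpler).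

-- int(s); Pre_solve guarantees the parse succeeds (Python raises ValueError otherwise)
def pvInt (s : String) : Int := (PySem.Int.ofStr? s).getD 0

-- ===== PORT A =====
def solve (A : List String) : Int :=
  let n : Int := (A.length : Int)
  let ones1 : Int := ((A.filter (fun i => pvInt i != 0)).map (fun _ => (1 : Int))).sum
  let sun1 : Int := ((PySem.List.pyRange 0 n 1).filter (fun i => pvInt (PySem.List.pyGetD A i "") != 0)).sum
  let ans1 : Int := sun1 - PySem.Int.floordiv (ones1 * (ones1 - 1)) 2
  let ones2 : Int := ((A.filter (fun i => pvInt i == 0)).map (fun _ => (1 : Int))).sum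
  let sun2 : Int := ((PySem.List.pyRange 0 n 1).filter (fun i => pvInt (PySem.List.pyGetD A i "") == 0)).sum
  let ans2 : Int := sun2 - PySem.Int.floordiv (ones2 * (ones2 - 1)) 2
  min ans1 ans2

-- ===== PORT B =====
def solve_alt (A : List String) : Int :=
  let st := A.foldl
    (fun (st : Int × Int × Int × Int) x =>
      if pvInt x != 0 then (st.1, st.2.1 + 1, st.2.2.1 + st.1, st.2.2.2)
      else (st.1 + 1, st.2.1, st.2.2.1, st.2.2.2 + st.2.1))
    (0, 0, 0, 0)
  min st.2.2.1 st.2.2.2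

-- ===== PRECONDITION & SPEC =====
-- Pre_: every element must parse as a Python int — A (and B) raise ValueError otherwise.
def Pre_solve (A : List String) : Prop := ∀ s ∈ A, (PySem.Int.ofStr? s).isSome = true
instance (A : List String) : Decidable (Pre_solve A) := by unfold Pre_solve; infer_instance
def pvWitness_solve : List String := ["1", "0", "1"]

def Spec_solve (A : List String) (out : Int) : Prop := out = solve_alt A
instance (A : List String) (out : Int) : Decidable (Spec_solve A out) := by unfold Spec_solve; infer_instance

-- ===== CLAIM (what is proved, stated in full; the proofs are below) =====
def Claim_equal_solve : Prop := ∀ (A : List String), Dom_solve A → Pre_solve A → Spec_solve A (solve A)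

-- ===== LEMMAS AND PROOFS =====

-- triangle number k(k-1)/2, recursively
def tri : Nat → Int
  | 0 => 0
  | n + 1 => tri n + n

-- sum of (start-shifted) indices of elements satisfying p
def sidx (p : String → Bool) : List String → Int → Int
  | [], _ => 0
  | x :: t, s => (if p x then s else 0) + sidx p t (s + 1)

theorem two_tri (n : Nat) : 2 * tri n = (n : Int) * ((n : Int) - 1) := by
  induction n with
  | zero => simp [tri]
  | succ n ih => push_cast [tri]; linear_combination ih

theorem tri_floordiv (n : Nat) :
    PySem.Int.floordiv ((n : Int) * ((n : Int) - 1)) 2 = tri n := by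
  rw [PySem.Int.floordiv_eq_ediv_of_pos (by norm_num), ← two_tri,
    Int.mul_ediv_cancel_left _ (by norm_num)]

theorem sidx_shift (p : String → Bool) (t : List String) (s : Int) :
    sidx p t s = sidx p t 0 + s * (t.countP p : Int) := by
  induction t generalizing s with
  | nil => simp [sidx]
  | cons x t ih =>
    simp only [sidx, List.countP_cons, ih (s + 1)]
    rw [ih (0 + 1)]
    split <;> push_cast <;> ring

theorem enum_sum (p : String → Bool) (A : List String) (s : Int) :
    (((PySem.List.enumerate A s).filter (fun q => p q.2)).map (fun q => q.1)).sum
      = sidx p A s := by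
  induction A generalizing s with
  | nil => simp [PySem.List.enumerate_nil, sidx]
  | cons x t ih =>
    simp only [PySem.List.enumerate_cons, List.filter_cons, sidx]
    split <;> simp [ih]

theorem sumIdx_eq (p : String → Bool) (A : List String) :
    ((PySem.List.pyRange 0 (A.length : Int) 1).filter
        (fun i => p (PySem.List.pyGetD A i ""))).sum = sidx p A 0 := by
  have h := enum_sum p A 0
  rw [PySem.List.enumerate_eq_map_pyRange A ""] at h
  rw [List.filter_map, List.map_map] at h
  simp only [Function.comp_def, PySem.List.len_eq] at h
  simpa using h

theorem ones_eq (p : String → Bool) (A : List String) :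
    ((A.filter p).map (fun _ => (1 : Int))).sum = (A.countP p : Int) := by
  rw [PySem.List.sum_map_const_int, mul_one, List.countP_eq_length_filter]

theorem foldB (p : String → Bool) (A : List String) (z o so sz : Int) :
    A.foldl
      (fun (st : Int × Int × Int × Int) x =>
        if p x then (st.1, st.2.1 + 1, st.2.2.1 + st.1, st.2.2.2)
        else (st.1 + 1, st.2.1, st.2.2.1, st.2.2.2 + st.2.1))
      (z, o, so, sz)
    = (z + (A.countP (fun x => !p x) : Int), o + (A.countP p : Int),
       so + z * (A.countP p : Int) + sidx p A 0 - tri (A.countP p),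
       sz + o * (A.countP (fun x => !p x) : Int) + sidx (fun x => !p x) A 0
         - tri (A.countP (fun x => !p x))) := by
  induction A generalizing z o so sz with
  | nil => simp [sidx, tri]
  | cons x t ih =>
    cases hp : p x
    case true =>
      simp only [List.foldl_cons, hp, if_true, ih, List.countP_cons, Bool.not_true,
        Bool.false_eq_true, if_false, Nat.add_zero, sidx, tri]
      rw [sidx_shift p t (0 + 1), sidx_shift (fun x => !p x) t (0 + 1)]
      refine Prod.ext ?_ (Prod.ext ?_ (Prod.ext ?_ ?_)) <;> push_cast <;> ring
    case false =>
      simp only [List.foldl_cons, hp, Bool.false_eq_true, if_false, ih, List.countP_cons,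
        Bool.not_false, if_true, Nat.add_zero, sidx, tri]
      rw [sidx_shift p t (0 + 1), sidx_shift (fun x => !p x) t (0 + 1)]
      refine Prod.ext ?_ (Prod.ext ?_ (Prod.ext ?_ ?_)) <;> push_cast <;> ring

-- ===== VERDICT (by name: the statement is the Claim_ definition above) =====
theorem solve_spec : Claim_equal_solve := by
  intro A _ _
  show solve A = solve_alt A
  have hz : ∀ i : String, (pvInt i == 0) = !(pvInt i != 0) := by
    intro i; simp [bne]
  unfold solve solve_alt
  simp only [hz]
  rw [foldB (fun x => pvInt x != 0) A 0 0 0 0]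
  simp only [ones_eq, tri_floordiv]
  have h1 := sumIdx_eq (fun s => pvInt s != 0) A
  have h2 := sumIdx_eq (fun s => !(pvInt s != 0)) A
  rw [h1, h2]
  simp [zero_mul]
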